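-- pv_equiv track=rewrite | github.com/UshnishG/AOC | 2.2.py | in_any_range
-- ===== SOURCE A (Python) =====
-- def in_any_range(x, merged):
--     # binary search in merged, non-overlapping ranges
--     lo, hi = 0, len(merged) - 1
--     while lo <= hi:
--         mid = (lo + hi) // 2
--         a, b = merged[mid]
--         if x < a:
--             hi = mid - 1
--         elif x > b:
--             lo = mid + 1
--         else:
--             return True
--     return False
-- ===== SOURCE B (Python) =====
-- def in_any_range(x, merged):
--     # divide-and-conquer on the list itself: test the middle element, then
--     # recurse on the left or right sublist obtained by slicing
--     def go(sub):
--         if not sub: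
--             return False
--         m = (len(sub) - 1) // 2
--         a, b = sub[m]
--         if x < a:
--             return go(sub[:m])
--         if x > b:
--             return go(sub[m + 1:])
--         return True
--     return go(merged)
-- ===== Notes on version B (the rewrite author's own statement) =====
-- stated objective: alternative
-- what changed: The index-based while-loop binary search is replaced by structural divide-and-conquer on the list itself: the recursion slices off half the sublist at each step and keeps no lo/hi indices, probing the same elements in the same order.
import Mathlib
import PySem

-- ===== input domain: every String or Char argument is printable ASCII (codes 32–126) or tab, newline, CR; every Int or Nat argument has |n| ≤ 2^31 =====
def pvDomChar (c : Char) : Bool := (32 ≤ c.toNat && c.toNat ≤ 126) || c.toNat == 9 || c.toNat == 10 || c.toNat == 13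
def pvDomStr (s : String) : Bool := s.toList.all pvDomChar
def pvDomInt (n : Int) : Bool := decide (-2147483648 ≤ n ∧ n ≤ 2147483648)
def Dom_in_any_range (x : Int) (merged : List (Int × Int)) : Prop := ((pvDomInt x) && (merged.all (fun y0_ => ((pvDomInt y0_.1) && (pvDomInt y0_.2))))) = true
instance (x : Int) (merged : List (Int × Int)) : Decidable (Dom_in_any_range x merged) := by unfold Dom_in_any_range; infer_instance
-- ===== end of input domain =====

-- B replaces the index-based while-loop binary search by structural divide-and-conquer
-- on the list itself, slicing off half the sublist at each step (objective: alternative).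

-- ===== PORT A =====
-- A's while loop, as a recursion over its state (lo, hi); merged[mid] is always in
-- range when reached from in_any_range, the 'none' guard only makes the recursion total
def inAnyRangeLoop (x : Int) (merged : List (Int × Int)) (lo hi : Int) : Bool :=
  if h : lo ≤ hi then
    let mid := PySem.Int.floordiv (lo + hi) 2
    match PySem.List.pyGet? merged mid with
    | none => false
    | some (a, b) =>
      if x < a then inAnyRangeLoop x merged lo (mid - 1)
      else if x > b then inAnyRangeLoop x merged (mid + 1) hi
      else true
  else false
termination_by (hi + 1 - lo).toNat
decreasing_by
  · have := PySem.Int.floordiv_two_mid_bounds h; omega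
  · have := PySem.Int.floordiv_two_mid_bounds h; omega

def in_any_range (x : Int) (merged : List (Int × Int)) : Bool :=
  inAnyRangeLoop x merged 0 ((merged.length : Int) - 1)

-- ===== PORT B =====
-- B's helper go(sub): probe the middle element of the sublist, recurse on the sliced
-- half (sub[:m] / sub[m+1:] ported as take/drop); no index state is kept
def inAnyRangeGo (x : Int) (sub : List (Int × Int)) : Bool :=
  if hs : sub = [] then false
  else
    let m := (sub.length - 1) / 2
    have hm : m < sub.length := by
      have h0 : sub.length ≠ 0 := fun h => hs (List.eq_nil_of_length_eq_zero h)
      have := Nat.div_le_self (sub.length - 1) 2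
      omega
    match sub[m] with
    | (a, b) =>
      if x < a then inAnyRangeGo x (sub.take m)
      else if x > b then inAnyRangeGo x (sub.drop (m + 1))
      else true
termination_by sub.length
decreasing_by
  · simp only [List.length_take]; omega
  · simp only [List.length_drop]; omega

def in_any_range_alt (x : Int) (merged : List (Int × Int)) : Bool :=
  inAnyRangeGo x merged

-- ===== PRECONDITION & SPEC =====
def Spec_in_any_range (x : Int) (merged : List (Int × Int)) (out : Bool) : Prop := out = in_any_range_alt x merged
instance (x : Int) (merged : List (Int × Int)) (out : Bool) : Decidable (Spec_in_any_range x merged out) := by unfold Spec_in_any_range; infer_instance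

-- ===== CLAIM (what is proved, stated in full; the proofs are below) =====
def Claim_equal_in_any_range : Prop := ∀ (x : Int) (merged : List (Int × Int)), Dom_in_any_range x merged → Spec_in_any_range x merged (in_any_range x merged)

-- ===== LEMMAS AND PROOFS =====
-- A's loop on (lo, hi) computes B's recursion on the sublist merged[lo..hi]
theorem loop_eq_go (x : Int) (merged : List (Int × Int)) :
    ∀ n (lo hi : Int), (hi + 1 - lo).toNat = n → 0 ≤ lo → hi < (merged.length : Int) →
      inAnyRangeLoop x merged lo hi =
        inAnyRangeGo x ((merged.drop lo.toNat).take (hi + 1 - lo).toNat) := by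
  intro n
  induction n using Nat.strong_induction_on with
  | _ n ih =>
    intro lo hi hn hlo hhi
    rw [inAnyRangeLoop, inAnyRangeGo]
    by_cases h : lo ≤ hi
    · set sub := (merged.drop lo.toNat).take (hi + 1 - lo).toNat with hsub
      have hlen : sub.length = (hi + 1 - lo).toNat := by
        simp [hsub, List.length_take, List.length_drop]; omega
      have hne : sub ≠ [] := by
        intro h0; rw [h0] at hlen; simp at hlen; omega
      simp only [h, dif_pos, hne, dif_neg, not_false_iff]
      have hb := PySem.Int.floordiv_two_mid_bounds h
      set mid := PySem.Int.floordiv (lo + hi) 2 with hmid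
      have hmide : mid = (lo + hi) / 2 := by
        rw [hmid, PySem.Int.floordiv_eq_ediv_of_pos (by omega)]
      have hm : (sub.length - 1) / 2 = (mid - lo).toNat := by
        rw [hlen]; omega
      have hmidlt : mid.toNat < merged.length := by omega
      have hget : PySem.List.pyGet? merged mid = merged[mid.toNat]? := by
        have h' := PySem.List.pyGet?_natCast (xs := merged) (n := mid.toNat)
        rwa [show ((mid.toNat : Nat) : Int) = mid from by omega] at h'
      have hmlt : (sub.length - 1) / 2 < sub.length := by
        have := Nat.div_le_self (sub.length - 1) 2
        omega
      obtain ⟨a, b, hpe⟩ : ∃ a b, merged[mid.toNat]'hmidlt = (a, b) := ⟨_, _, rfl⟩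
      have hsubget : sub[(sub.length - 1) / 2]'hmlt = (a, b) := by
        rw [← hpe]
        simp only [hsub, List.getElem_take, List.getElem_drop]
        congr 1
        rw [← hsub, hm]; omega
      rw [hget, List.getElem?_eq_getElem hmidlt, hpe]
      simp only [List.get_eq_getElem, hsubget]
      by_cases h1 : x < a
      · simp only [h1, if_pos]
        rw [ih ((mid - 1) + 1 - lo).toNat (by omega) lo (mid - 1) rfl hlo (by omega)]
        rw [hsub, hm, List.take_take,
          show min ((mid - lo).toNat) ((hi + 1 - lo).toNat) = ((mid - 1) + 1 - lo).toNat from by omega]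
      · by_cases h2 : x > b
        · simp only [h1, if_neg, not_false_iff, h2, if_pos]
          rw [ih (hi + 1 - (mid + 1)).toNat (by omega) (mid + 1) hi rfl (by omega) hhi]
          rw [hsub, hm, List.drop_take, List.drop_drop,
            show (hi + 1 - lo).toNat - ((mid - lo).toNat + 1) = (hi + 1 - (mid + 1)).toNat from by omega,
            show lo.toNat + ((mid - lo).toNat + 1) = (mid + 1).toNat from by omega]
        · simp [h1, h2]
    · have h0 : (hi + 1 - lo).toNat = 0 := by omega
      rw [h0]
      simp [h]

-- ===== VERDICT (by name: the statement is the Claim_ definition above) =====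
theorem in_any_range_spec : Claim_equal_in_any_range := by
  intro x merged _
  unfold Spec_in_any_range in_any_range in_any_range_alt
  rw [loop_eq_go x merged ((merged.length : Int) - 1 + 1 - 0).toNat 0 ((merged.length : Int) - 1) rfl (by omega) (by omega)]
  congr 1
  simp
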